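-- pv_equiv track=rewrite | github.com/MarineGirardey/long_indel_caller | long_indel_caller_functions.py | len_before_indel
-- ===== SOURCE A (Python) =====
-- def len_before_indel(chromosome, start_pos_read, cigar_tuples, tup):
--     """
--     Compute the fragment length before the INDEL thanks to cigartuple and return position of the INDEL
--
--     Parameters
--     ----------
--     chromosome : chromosome that matches the read
--     start_pos_read : start position of the alignment of the read
--     cigar_tuples : the dictionary to update
--     tup : Indel tuple
--
--     Returns
--     ----------
--     indel_chr_position : chromosomal position of the concerned INDEL
--     """
--
--     # Variable to add nucleotide to the start position of the read until the I or D cigar letter is found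
--     fragment_len_before_indel = 0
--
--     # Then takes the index of this tuple
--     index_tuple = cigar_tuples.index(tup)
--     # Use the index to store all the tuples before this one (the one with the indel)
--     tuples_of_interest_before_indel = cigar_tuples[:index_tuple]
--
--     if len(tuples_of_interest_before_indel) == 0:
--
--         fragment_len_before_indel = 0
--         indel_chr_position = chromosome + ':' + str(start_pos_read + fragment_len_before_indel)
--
--         return indel_chr_position
--
--     else:
--         # For each tuple before the tuple that contain the indel
--         for tuple_before_indel in tuples_of_interest_before_indel:
--             # Store the length of the match until the indel is reached
--             fragment_len_before_indel += tuple_before_indel[1] +1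
--             # Add this length to the alignment start position of the read (position on the reference) (O based)
--             indel_chr_position = chromosome + ':' + str(start_pos_read + fragment_len_before_indel)
--
--     return indel_chr_position
-- ===== SOURCE B (Python) =====
-- def len_before_indel(chromosome, start_pos_read, cigar_tuples, tup):
--     # Single fused pass: accumulate lengths until tup is found, then format.
--     fragment_len = 0
--     for t in cigar_tuples:
--         if t == tup:
--             return chromosome + ':' + str(start_pos_read + fragment_len)
--         fragment_len += t[1] + 1
--     raise ValueError('%s is not in list' % (tup,))
-- ===== Notes on version B (the rewrite author's own statement) =====
-- stated objective: simpler
-- what changed: B fuses list.index, the slice and the prefix loop into one accumulate-until-match pass with an early return, removing the slice copy and the empty-prefix special case.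
import Mathlib
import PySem

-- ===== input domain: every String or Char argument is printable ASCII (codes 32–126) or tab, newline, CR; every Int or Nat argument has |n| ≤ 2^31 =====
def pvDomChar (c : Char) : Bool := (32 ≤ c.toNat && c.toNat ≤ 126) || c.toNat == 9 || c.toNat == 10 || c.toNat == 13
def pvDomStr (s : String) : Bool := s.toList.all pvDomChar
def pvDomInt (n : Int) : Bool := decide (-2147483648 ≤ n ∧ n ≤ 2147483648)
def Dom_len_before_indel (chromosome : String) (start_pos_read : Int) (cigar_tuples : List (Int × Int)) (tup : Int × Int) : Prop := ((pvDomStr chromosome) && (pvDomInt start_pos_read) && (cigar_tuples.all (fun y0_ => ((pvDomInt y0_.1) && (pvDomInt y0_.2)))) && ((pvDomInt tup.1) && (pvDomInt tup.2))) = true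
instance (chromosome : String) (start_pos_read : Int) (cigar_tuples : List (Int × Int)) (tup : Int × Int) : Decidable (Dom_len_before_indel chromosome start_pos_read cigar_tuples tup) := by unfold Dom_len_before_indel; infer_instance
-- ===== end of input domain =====

-- B fuses index()+slice+prefix-loop into one accumulate-until-match pass; proved equal to A whenever tup occurs in cigar_tuples (else both raise ValueError).


-- ===== PORT A =====
def len_before_indel (chromosome : String) (start_pos_read : Int) (cigar_tuples : List (Int × Int)) (tup : Int × Int) : String :=
  match PySem.List.index? cigar_tuples tup with
  | none => ""   -- Python raises ValueError here (tup not in list); excluded by Pre_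
  | some index_tuple =>
    let tuples_of_interest_before_indel := PySem.List.slice cigar_tuples none (some (index_tuple : Int))
    if tuples_of_interest_before_indel.length = 0 then
      chromosome ++ ":" ++ PySem.Int.toStr (start_pos_read + 0)
    else
      -- the loop carries (fragment_len_before_indel, indel_chr_position); the "" is the unbound initial value, overwritten on the first (guaranteed) iteration
      (tuples_of_interest_before_indel.foldl
        (fun (acc : Int × String) t =>
          let f := acc.1 + t.2 + 1
          (f, chromosome ++ ":" ++ PySem.Int.toStr (start_pos_read + f))) ((0 : Int), "")).2

-- ===== PORT B =====
def lbiLoop (chromosome : String) (start_pos_read : Int) (tup : Int × Int) : Int → List (Int × Int) → String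
  | _, [] => ""   -- Python raises ValueError here; excluded by Pre_
  | fragment_len, t :: rest =>
    if t = tup then chromosome ++ ":" ++ PySem.Int.toStr (start_pos_read + fragment_len)
    else lbiLoop chromosome start_pos_read tup (fragment_len + t.2 + 1) rest

def len_before_indel_alt (chromosome : String) (start_pos_read : Int) (cigar_tuples : List (Int × Int)) (tup : Int × Int) : String :=
  lbiLoop chromosome start_pos_read tup 0 cigar_tuples

-- ===== PRECONDITION & SPEC =====
-- Pre_ excludes exactly the inputs where tup does not occur in cigar_tuples: there Python A raises ValueError (list.index), and Python B raises ValueError too.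
def Pre_len_before_indel (chromosome : String) (start_pos_read : Int) (cigar_tuples : List (Int × Int)) (tup : Int × Int) : Prop := tup ∈ cigar_tuples
instance (chromosome : String) (start_pos_read : Int) (cigar_tuples : List (Int × Int)) (tup : Int × Int) : Decidable (Pre_len_before_indel chromosome start_pos_read cigar_tuples tup) := by unfold Pre_len_before_indel; infer_instance
def pvWitness_len_before_indel : String × Int × (List (Int × Int)) × (Int × Int) := ("chr1", 100, [(0, 5), (1, 2)], (1, 2))

def Spec_len_before_indel (chromosome : String) (start_pos_read : Int) (cigar_tuples : List (Int × Int)) (tup : Int × Int) (out : String) : Prop := out = len_before_indel_alt chromosome start_pos_read cigar_tuples tup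
instance (chromosome : String) (start_pos_read : Int) (cigar_tuples : List (Int × Int)) (tup : Int × Int) (out : String) : Decidable (Spec_len_before_indel chromosome start_pos_read cigar_tuples tup out) := by unfold Spec_len_before_indel; infer_instance

-- ===== CLAIM (what is proved, stated in full; the proofs are below) =====
def Claim_equal_len_before_indel : Prop := ∀ (chromosome : String) (start_pos_read : Int) (cigar_tuples : List (Int × Int)) (tup : Int × Int), Dom_len_before_indel chromosome start_pos_read cigar_tuples tup → Pre_len_before_indel chromosome start_pos_read cigar_tuples tup → Spec_len_before_indel chromosome start_pos_read cigar_tuples tup (len_before_indel chromosome start_pos_read cigar_tuples tup)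

-- ===== LEMMAS AND PROOFS =====

-- A's loop over the prefix before the first occurrence of tup, started at fragment length f
-- with the matching already-written position string, equals B's loop started at f.
theorem lbi_prefix_fold (chromosome : String) (start_pos_read : Int) (tup : Int × Int)
    (l : List (Int × Int)) (i : Nat) (f : Int)
    (hi : PySem.List.index? l tup = some i) :
    ((l.take i).foldl
        (fun (acc : Int × String) t =>
          let g := acc.1 + t.2 + 1
          (g, chromosome ++ ":" ++ PySem.Int.toStr (start_pos_read + g)))
        (f, chromosome ++ ":" ++ PySem.Int.toStr (start_pos_read + f))).2
      = lbiLoop chromosome start_pos_read tup f l := by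
  induction l generalizing i f with
  | nil => simp [PySem.List.index?] at hi
  | cons t rest ih =>
    by_cases ht : t = tup
    · subst ht
      rw [PySem.List.index?_cons_self] at hi
      cases hi
      simp [lbiLoop]
    · rw [PySem.List.index?_cons_of_ne _ ht] at hi
      rcases Option.map_eq_some_iff.mp hi with ⟨j, hj, rfl⟩
      simp only [List.take_succ_cons, List.foldl_cons]
      rw [ih j (f + t.2 + 1) hj]
      simp [lbiLoop, ht]

theorem len_before_indel_eq_alt (chromosome : String) (start_pos_read : Int)
    (cigar_tuples : List (Int × Int)) (tup : Int × Int)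
    (hmem : tup ∈ cigar_tuples) :
    len_before_indel chromosome start_pos_read cigar_tuples tup
      = len_before_indel_alt chromosome start_pos_read cigar_tuples tup := by
  cases cigar_tuples with
  | nil => simp at hmem
  | cons t rest =>
    unfold len_before_indel len_before_indel_alt
    by_cases ht : t = tup
    · subst ht
      rw [PySem.List.index?_cons_self]
      dsimp only
      rw [PySem.List.slice_to_natCast]
      simp [lbiLoop]
    · have hmem' : tup ∈ rest := by
        rcases List.mem_cons.mp hmem with h | h
        · exact absurd h.symm ht
        · exact h
      rcases Option.isSome_iff_exists.mp ((PySem.List.index?_isSome_iff rest tup).mpr hmem') with ⟨j, hj⟩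
      rw [PySem.List.index?_cons_of_ne _ ht, hj]
      simp only [Option.map_some]
      rw [show ((((j + 1 : Nat) : Int))) = (((j + 1 : Nat) : Int)) from rfl,
          PySem.List.slice_to_natCast]
      simp only [List.take_succ_cons, List.length_cons, Nat.succ_ne_zero,
        List.foldl_cons]
      rw [lbi_prefix_fold chromosome start_pos_read tup rest j ((0 : Int) + t.2 + 1) hj]
      simp [lbiLoop, ht]

-- ===== VERDICT (by name: the statement is the Claim_ definition above) =====
theorem len_before_indel_spec : Claim_equal_len_before_indel := by
  intro chromosome start_pos_read cigar_tuples tup _ hpre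
  exact len_before_indel_eq_alt chromosome start_pos_read cigar_tuples tup hpre
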